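-- pv_equiv track=rewrite | github.com/andriizubko20/Capper | model/gem/movement_filter.py | _per_book_series
-- ===== SOURCE A (Python) =====
-- def _per_book_series(rows: list[dict]) -> dict[tuple[str, str], list[dict]]:
--     """Group rows by (bookmaker, outcome), sorted by recorded_at ascending."""
--     out: dict[tuple[str, str], list[dict]] = {}
--     for r in rows:
--         key = (r["bookmaker"], r["outcome"])
--         out.setdefault(key, []).append(r)
--     for k in out:
--         out[k].sort(key=lambda r: r["recorded_at"])
--     return out
-- ===== SOURCE B (Python) =====
-- def _per_book_series(rows: list[dict]) -> dict[tuple[str, str], list[dict]]: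
--     """Group rows by (bookmaker, outcome), sorted by recorded_at ascending.
--
--     One stable global sort by recorded_at, then a single grouping pass into a
--     dict pre-seeded with the keys in first-appearance order, so no per-group
--     sorting is needed.
--     """
--     out = {k: [] for k in dict.fromkeys((r["bookmaker"], r["outcome"]) for r in rows)}
--     for r in sorted(rows, key=lambda r: r["recorded_at"]):
--         out[(r["bookmaker"], r["outcome"])].append(r)
--     return out
-- ===== Notes on version B (the rewrite author's own statement) =====
-- stated objective: alternative
-- what changed: B replaces A's group-then-sort-each-group (a dict of lists each sorted separately) by one stable global sort by recorded_at followed by a single grouping pass into a dict pre-seeded with the keys in first-appearance order; stability of the global sort makes each group come out identically sorted.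
import Mathlib
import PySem

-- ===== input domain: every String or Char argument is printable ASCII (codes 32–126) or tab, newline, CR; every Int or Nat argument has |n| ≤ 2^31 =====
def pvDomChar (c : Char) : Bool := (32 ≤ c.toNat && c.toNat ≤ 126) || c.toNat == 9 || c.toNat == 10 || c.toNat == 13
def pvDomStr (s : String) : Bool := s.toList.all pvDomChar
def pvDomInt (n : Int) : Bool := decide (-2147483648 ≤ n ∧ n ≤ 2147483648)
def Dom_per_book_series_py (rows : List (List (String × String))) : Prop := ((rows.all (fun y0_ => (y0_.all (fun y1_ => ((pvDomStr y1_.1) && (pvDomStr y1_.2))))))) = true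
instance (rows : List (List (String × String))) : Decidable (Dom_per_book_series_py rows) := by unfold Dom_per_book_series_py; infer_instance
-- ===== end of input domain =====

-- B replaces A's per-group sorts with ONE stable global sort by recorded_at followed by a single
-- grouping pass into a dict pre-seeded with the keys in first-appearance order (alternative
-- decomposition, same result). A mutates its dict's value lists in place; both ports are pure and
-- the equivalence is about the returned value.

-- r[k] for a row dict (first match in the association list; missing key = KeyError, excluded by Pre_)
def pvRowGet (r : List (String × String)) (k : String) : String :=
  (PySem.Dict.mk r).getD k ""

def pvKeyOf (r : List (String × String)) : String × String :=
  (pvRowGet r "bookmaker", pvRowGet r "outcome")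

def pvRecAt (r : List (String × String)) : String :=
  pvRowGet r "recorded_at"

-- ===== PORT A =====
-- out = {}; for r in rows: out.setdefault((r["bookmaker"], r["outcome"]), []).append(r)
-- for k in out: out[k].sort(key=lambda r: r["recorded_at"])   (in-place sort of each value)
def per_book_series_py (rows : List (List (String × String))) : List (String × String × List (List (String × String))) :=
  let out : PySem.Dict (String × String) (List (List (String × String))) :=
    rows.foldl (fun d r => d.modify (pvKeyOf r) [] (fun v => v ++ [r])) PySem.Dict.empty
  let out2 : PySem.Dict (String × String) (List (List (String × String))) :=
    PySem.Dict.mk (out.items.map (fun p => (p.1, PySem.List.sorted p.2 pvRecAt false)))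
  out2.items.map (fun p => (p.1.1, p.1.2, p.2))

-- ===== PORT B =====
-- out = {k: [] for k in dict.fromkeys(...)}; for r in sorted(rows, key=recorded_at): out[key].append(r)
def per_book_series_py_alt (rows : List (List (String × String))) : List (String × String × List (List (String × String))) :=
  let keys : List (String × String) := PySem.List.dedup (rows.map pvKeyOf)
  let out0 : PySem.Dict (String × String) (List (List (String × String))) :=
    keys.foldl (fun d k => d.insert k []) PySem.Dict.empty
  let out : PySem.Dict (String × String) (List (List (String × String))) :=
    (PySem.List.sorted rows pvRecAt false).foldl
      (fun d r => d.modify (pvKeyOf r) [] (fun v => v ++ [r])) out0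
  out.items.map (fun p => (p.1.1, p.1.2, p.2))

-- ===== PRECONDITION & SPEC =====
-- Pre_: every row carries the keys "bookmaker", "outcome" and "recorded_at"; on any other input
-- the Python A raises KeyError (it returns on every input satisfying Pre_).
def Pre_per_book_series_py (rows : List (List (String × String))) : Prop :=
  (rows.all (fun r => (PySem.Dict.mk r).contains "bookmaker"
      && (PySem.Dict.mk r).contains "outcome"
      && (PySem.Dict.mk r).contains "recorded_at")) = true
instance (rows : List (List (String × String))) : Decidable (Pre_per_book_series_py rows) := by unfold Pre_per_book_series_py; infer_instance

def pvWitness_per_book_series_py : (List (List (String × String))) :=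
  [[("bookmaker", "pin"), ("outcome", "over"), ("recorded_at", "2"), ("price", "1.9")],
   [("bookmaker", "pin"), ("outcome", "over"), ("recorded_at", "1")],
   [("bookmaker", "bf"), ("outcome", "under"), ("recorded_at", "1")]]

def Spec_per_book_series_py (rows : List (List (String × String))) (out : List (String × String × List (List (String × String)))) : Prop := out = per_book_series_py_alt rows
instance (rows : List (List (String × String))) (out : List (String × String × List (List (String × String)))) : Decidable (Spec_per_book_series_py rows out) := by unfold Spec_per_book_series_py; infer_instance

-- ===== CLAIM (what is proved, stated in full; the proofs are below) =====
def Claim_equal_per_book_series_py : Prop := ∀ (rows : List (List (String × String))), Dom_per_book_series_py rows → Pre_per_book_series_py rows → Spec_per_book_series_py rows (per_book_series_py rows)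

-- ===== LEMMAS AND PROOFS =====

-- insertBy puts x in front when it goes before every element of the list
theorem pv_insertBy_of_forall_before {α : Type} (before : α → α → Bool) (x : α) (l : List α)
    (h : ∀ y ∈ l, before x y = true) :
    PySem.List.insertBy before x l = x :: l := by
  cases l with
  | nil => rfl
  | cons z t => simp [PySem.List.insertBy, h z (List.mem_cons_self)]

-- filter commutes with a single stable insertion into a key-sorted list
theorem pv_filter_insertBy {α κ : Type} [LinearOrder κ] (key : α → κ) (p : α → Bool) (x : α)
    (ys : List α) (h : ys.Pairwise (fun a b => key a ≤ key b)) :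
    (PySem.List.insertBy (fun a b => decide (key a < key b)) x ys).filter p
      = if p x then PySem.List.insertBy (fun a b => decide (key a < key b)) x (ys.filter p)
        else ys.filter p := by
  induction ys with
  | nil =>
      by_cases hp : p x <;> simp [PySem.List.insertBy, hp]
  | cons y t ih =>
      rcases List.pairwise_cons.mp h with ⟨hy, ht⟩
      by_cases hlt : key x < key y
      · have hall : ∀ z ∈ y :: t, (fun a b => decide (key a < key b)) x z = true := by
          intro z hz
          rcases List.mem_cons.mp hz with rfl | hz
          · simpa using hlt
          · simpa using lt_of_lt_of_le hlt (hy z hz)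
        rw [pv_insertBy_of_forall_before _ _ _ hall]
        by_cases hp : p x
        · have hall' : ∀ z ∈ (y :: t).filter p, (fun a b => decide (key a < key b)) x z = true :=
            fun z hz => hall z (List.mem_of_mem_filter hz)
          rw [pv_insertBy_of_forall_before _ _ _ hall']
          simp [hp]
        · simp [hp]
      · have hstep : PySem.List.insertBy (fun a b => decide (key a < key b)) x (y :: t)
            = y :: PySem.List.insertBy (fun a b => decide (key a < key b)) x t := by
          simp [PySem.List.insertBy, hlt]
        rw [hstep]
        by_cases hpy : p y
        · have : PySem.List.insertBy (fun a b => decide (key a < key b)) x ((y :: t).filter p)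
              = y :: PySem.List.insertBy (fun a b => decide (key a < key b)) x (t.filter p) := by
            simp [hpy, PySem.List.insertBy, hlt]
          rw [List.filter_cons_of_pos hpy, ih ht, this]
          by_cases hp : p x <;> simp [hp, hpy]
        · rw [List.filter_cons_of_neg hpy, ih ht]
          by_cases hp : p x <;> simp [hp, hpy]

-- filtering a stably sorted list = sorting the filtered list
theorem pv_filter_sorted {α κ : Type} [LinearOrder κ] (key : α → κ) (p : α → Bool)
    (xs : List α) :
    (PySem.List.sorted xs key false).filter p = PySem.List.sorted (xs.filter p) key false := by
  induction xs using List.reverseRecOn with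
  | nil => rfl
  | append_singleton xs x ih =>
      have hsnoc : ∀ (l : List α),
          PySem.List.sorted (l ++ [x]) key false
            = PySem.List.insertBy (fun a b => decide (key a < key b)) x
                (PySem.List.sorted l key false) := by
        intro l
        rw [PySem.List.sorted_eq_foldl_insertBy, PySem.List.sorted_eq_foldl_insertBy,
          List.foldl_append]
        rfl
      rw [hsnoc, pv_filter_insertBy key p x _ (PySem.List.sorted_pairwise xs key), ih,
        List.filter_append]
      by_cases hp : p x
      · simp only [List.filter_cons, hp, List.filter_nil, if_true, hsnoc]
      · simp [hp]

-- the grouping fold from A: keys in first-appearance order, values = filtered sublists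
theorem pv_group_items (rows : List (List (String × String))) :
    (rows.foldl (fun d r => d.modify (pvKeyOf r) [] (fun v => v ++ [r]))
        (PySem.Dict.empty : PySem.Dict (String × String) (List (List (String × String))))).items
      = (PySem.Set.ofList (rows.map pvKeyOf)).map
          (fun k => (k, rows.filter (fun r => pvKeyOf r == k))) := by
  set D := rows.foldl (fun d r => d.modify (pvKeyOf r) [] (fun v => v ++ [r]))
      (PySem.Dict.empty : PySem.Dict (String × String) (List (List (String × String)))) with hD
  have hkeys : D.keys = PySem.Set.ofList (rows.map pvKeyOf) := by
    rw [hD, PySem.Dict.keys_foldl_modify_key rows pvKeyOf [] (fun _ r => (fun v => v ++ [r]))]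
    rw [PySem.Set.update_eq_append_filter]
    simp [PySem.Dict.keys_empty, PySem.Set.contains]
  have hnodup : D.keys.Nodup := by rw [hkeys]; exact PySem.Set.nodup_ofList _
  have hget : ∀ k, D.getD k [] = rows.filter (fun r => pvKeyOf r == k) := by
    intro k
    have hfold : D = (rows.map (fun r => (pvKeyOf r, r))).foldl
        (fun d p => d.modify p.1 [] (fun v => v ++ [p.2])) PySem.Dict.empty := by
      rw [hD, List.foldl_map]
    rw [hfold, PySem.Dict.getD_foldl_modify_append]
    simp [List.filter_map, Function.comp_def]
  rw [PySem.Dict.items_eq_map_keys D hnodup [], hkeys]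
  exact List.map_congr_left (fun k _ => by rw [hget k])

-- every key of the seed dict maps to []
theorem pv_seed_getD (ks : List (String × String))
    (d : PySem.Dict (String × String) (List (List (String × String))))
    (hd : ∀ x, d.getD x [] = []) (x : String × String) :
    (ks.foldl (fun d k => d.insert k []) d).getD x [] = [] := by
  induction ks generalizing d with
  | nil => exact hd x
  | cons k t ih =>
      refine ih _ (fun y => ?_)
      by_cases h : k = y
      · subst h; simp [PySem.Dict.getD_insert_self]
      · rw [PySem.Dict.getD_insert_of_ne]
        · exact hd y
        · simpa using (Ne.symm h)
  
-- the items of B's dict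
theorem pv_alt_items (rows : List (List (String × String))) :
    (((PySem.List.sorted rows pvRecAt false).foldl
        (fun d r => d.modify (pvKeyOf r) [] (fun v => v ++ [r]))
        ((PySem.List.dedup (rows.map pvKeyOf)).foldl (fun d k => d.insert k [])
          (PySem.Dict.empty : PySem.Dict (String × String) (List (List (String × String))))))).items
      = (PySem.Set.ofList (rows.map pvKeyOf)).map
          (fun k => (k, (PySem.List.sorted rows pvRecAt false).filter (fun r => pvKeyOf r == k))) := by
  set ks := PySem.List.dedup (rows.map pvKeyOf) with hks
  set d0 := ks.foldl (fun d k => d.insert k [])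
      (PySem.Dict.empty : PySem.Dict (String × String) (List (List (String × String)))) with hd0
  set srt := PySem.List.sorted rows pvRecAt false with hsrt
  set D := srt.foldl (fun d r => d.modify (pvKeyOf r) [] (fun v => v ++ [r])) d0 with hD
  have hkeys0 : d0.keys = ks := by
    rw [hd0, PySem.Dict.keys_foldl_insert]
    rw [PySem.Set.update_eq_append_filter]
    simp [PySem.Dict.keys_empty, PySem.Set.contains, hks, PySem.List.dedup_eq_ofList]
  have hkeys : D.keys = PySem.Set.ofList (rows.map pvKeyOf) := by
    rw [hD, PySem.Dict.keys_foldl_modify_key srt pvKeyOf [] (fun _ r => (fun v => v ++ [r]))]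
    rw [PySem.Set.update_eq_append_filter, hkeys0]
    have hsub : ∀ k ∈ PySem.Set.ofList (srt.map pvKeyOf), k ∈ ks := by
      intro k hk
      rw [hks, PySem.List.dedup_eq_ofList, PySem.Set.mem_ofList]
      have := (PySem.Set.mem_ofList _ _).mp hk
      rcases List.mem_map.mp this with ⟨r, hr, rfl⟩
      exact List.mem_map_of_mem ((PySem.List.mem_sorted rows pvRecAt false r).mp (hsrt ▸ hr))
    have hfilt : (PySem.Set.ofList (srt.map pvKeyOf)).filter
        (fun y => !(PySem.Set.contains ks y)) = [] := by
      rw [List.filter_eq_nil_iff]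
      intro k hk
      have : k ∈ ks := hsub k hk
      simp [PySem.Set.contains, this]
    rw [hfilt, List.append_nil, hks, PySem.List.dedup_eq_ofList]
  have hnodup : D.keys.Nodup := by rw [hkeys]; exact PySem.Set.nodup_ofList _
  have hget : ∀ k, D.getD k [] = srt.filter (fun r => pvKeyOf r == k) := by
    intro k
    have hfold : D = (srt.map (fun r => (pvKeyOf r, r))).foldl
        (fun d p => d.modify p.1 [] (fun v => v ++ [p.2])) d0 := by
      rw [hD, List.foldl_map]
    rw [hfold, PySem.Dict.getD_foldl_modify_append]
    have h0 : d0.getD k [] = [] := by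
      rw [hd0]
      exact pv_seed_getD ks PySem.Dict.empty (fun x => by simp [PySem.Dict.getD_empty]) k
    rw [h0]
    simp [List.filter_map, Function.comp_def]
  rw [PySem.Dict.items_eq_map_keys D hnodup [], hkeys]
  exact List.map_congr_left (fun k _ => by rw [hget k])

-- ===== VERDICT (by name: the statement is the Claim_ definition above) =====
theorem per_book_series_py_spec : Claim_equal_per_book_series_py := by
  intro rows _ _
  simp only [Spec_per_book_series_py, per_book_series_py, per_book_series_py_alt]
  rw [pv_group_items rows, pv_alt_items rows]
  simp only [List.map_map]
  refine List.map_congr_left (fun k _ => ?_)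
  simp only [Function.comp_def]
  rw [pv_filter_sorted pvRecAt (fun r => pvKeyOf r == k) rows]
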